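-- pv_equiv track=rewrite | github.com/MarcoGrimaldo/Convoluciones | pracS.py | centro
-- ===== SOURCE A (Python) =====
-- def centro(strg):
-- 	indice_conv = 0
-- 	cont = 0
--
-- 	for i in strg:
-- 		if(i == "*"):
-- 			indice_conv = cont
-- 		if(i == ","):
-- 			cont += 1
-- 	return indice_conv
-- ===== SOURCE B (Python) =====
-- def centro(strg):
--     res = 0
--     for i, g in enumerate(strg.split(",")):
--         if "*" in g:
--             res = i
--     return res
-- ===== Notes on version B (the rewrite author's own statement) =====
-- stated objective: faster
-- what changed: Replaces the per-character scan that counts commas and records the running group counter at each star marker with a split-on-comma followed by an enumerate pass that keeps the index of the last group containing the marker.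
import Mathlib
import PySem

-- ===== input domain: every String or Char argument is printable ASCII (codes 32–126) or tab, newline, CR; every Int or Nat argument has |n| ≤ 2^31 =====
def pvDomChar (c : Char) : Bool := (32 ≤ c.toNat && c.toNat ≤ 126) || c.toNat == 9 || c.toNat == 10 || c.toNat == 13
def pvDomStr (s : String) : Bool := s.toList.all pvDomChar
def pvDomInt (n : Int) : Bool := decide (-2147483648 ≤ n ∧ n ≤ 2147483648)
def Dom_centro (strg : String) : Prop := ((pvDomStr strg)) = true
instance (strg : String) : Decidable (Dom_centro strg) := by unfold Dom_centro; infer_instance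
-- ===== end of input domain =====

-- B replaces A's per-character comma-counting scan with split-on-comma plus an
-- enumerate pass recording the index of the last group containing '*' (objective: simpler).

-- ===== PORT A =====
-- step of A's for-loop: first the '*' check, then the ',' check, over state (indice_conv, cont)
def centroStep (st : Int × Int) (i : Char) : Int × Int :=
  let st1 := if i == '*' then (st.2, st.2) else st
  if i == ',' then (st1.1, st1.2 + 1) else st1

def centro (strg : String) : Int :=
  (strg.toList.foldl centroStep (0, 0)).1

-- ===== PORT B =====
-- B's loop: res := i whenever "*" in g, over enumerate(strg.split(","))
def centro_alt (strg : String) : Int :=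
  (PySem.List.enumerate (PySem.Chars.splitOn strg.toList [',']) 0).foldl
    (fun res p => if PySem.Chars.isIn ['*'] p.2 then p.1 else res) 0

-- ===== PRECONDITION & SPEC =====
def Spec_centro (strg : String) (out : Int) : Prop := out = centro_alt strg
instance (strg : String) (out : Int) : Decidable (Spec_centro strg out) := by unfold Spec_centro; infer_instance

-- ===== CLAIM (what is proved, stated in full; the proofs are below) =====
def Claim_equal_centro : Prop := ∀ (strg : String), Dom_centro strg → Spec_centro strg (centro strg)

-- ===== LEMMAS AND PROOFS =====

-- reference split on ',': the current group is accumulated reversed in `cur`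
def splitC : List Char → List Char → List (List Char)
  | [], cur => [cur.reverse]
  | c :: r, cur => if c = ',' then cur.reverse :: splitC r [] else splitC r (c :: cur)

-- index (from 0) of the last group containing '*', 0 if none
def lastStar : List (List Char) → Int
  | [] => 0
  | _ :: gs => if gs.any (fun g => decide ('*' ∈ g)) then 1 + lastStar gs else 0

theorem isIn_star_singleton (g : List Char) :
    PySem.Chars.isIn ['*'] g = decide ('*' ∈ g) := by
  rcases h : PySem.Chars.isIn ['*'] g with _|_
  · have hn := (PySem.Chars.isIn_eq_false_iff _ _).mp h
    symm
    simp only [decide_eq_false_iff_not]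
    intro hm
    obtain ⟨s, t, rfl⟩ := List.append_of_mem hm
    exact hn ⟨s, t, by simp⟩
  · have := ((PySem.Chars.isIn_iff_infix _ _).mp h).mem
      (show '*' ∈ ['*'] from List.mem_singleton.mpr rfl)
    simp [this]

theorem splitOn_go_spec : ∀ (fuel : Nat) (l cur : List Char) (acc : List (List Char)),
    l.length ≤ fuel →
    PySem.Chars.splitOn.go [','] fuel l cur acc = acc.reverse ++ splitC l cur := by
  intro fuel
  induction fuel with
  | zero =>
    intro l cur acc hl
    have : l = [] := List.eq_nil_of_length_eq_zero (Nat.le_zero.mp hl)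
    subst this
    simp [PySem.Chars.splitOn.go, splitC]
  | succ n ih =>
    intro l cur acc hl
    cases l with
    | nil => simp [PySem.Chars.splitOn.go, splitC]
    | cons c rest =>
      by_cases hc : c = ','
      · subst hc
        rw [show PySem.Chars.splitOn.go [','] (n+1) (',' :: rest) cur acc
              = PySem.Chars.splitOn.go [','] n rest [] (cur.reverse :: acc) from by
            simp [PySem.Chars.splitOn.go, List.isPrefixOf]]
        rw [ih rest [] _ (by simpa using Nat.le_of_succ_le_succ (by simpa using hl))]
        simp [splitC]
      · rw [show PySem.Chars.splitOn.go [','] (n+1) (c :: rest) cur acc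
              = PySem.Chars.splitOn.go [','] n rest (c :: cur) acc from by
            simp [PySem.Chars.splitOn.go, List.isPrefixOf]
            exact fun h => absurd h.symm hc]
        rw [ih rest (c :: cur) acc (by simpa using hl)]
        simp [splitC, hc]

theorem splitOn_eq_splitC (l : List Char) :
    PySem.Chars.splitOn l [','] = splitC l [] := by
  unfold PySem.Chars.splitOn
  rw [splitOn_go_spec _ _ _ _ (by omega)]
  simp

theorem anyStar_splitC (l : List Char) : ∀ cur,
    (splitC l cur).any (fun g => decide ('*' ∈ g)) = ('*' ∈ l || '*' ∈ cur) := by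
  induction l with
  | nil => intro cur; simp [splitC]
  | cons c r ih =>
    intro cur
    by_cases hc : c = ','
    · subst hc
      simp [splitC, ih, List.mem_cons]
      ac_rfl
    · simp only [splitC, if_neg hc, ih (c :: cur), List.mem_cons]
      by_cases hs : c = '*' <;> simp [hs] <;> ac_rfl

theorem lastStar_splitC_cur (l : List Char) : ∀ cur,
    lastStar (splitC l cur) = lastStar (splitC l []) := by
  induction l with
  | nil => intro cur; simp [splitC, lastStar]
  | cons c r ih =>
    intro cur
    by_cases hc : c = ','
    · subst hc; simp [splitC, lastStar]
    · simp only [splitC, if_neg hc]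
      rw [ih (c :: cur), ih [c]]

theorem lastStar_splitC_noStar (l : List Char) (h : '*' ∉ l) : ∀ cur,
    lastStar (splitC l cur) = 0 := by
  induction l with
  | nil => intro cur; simp [splitC, lastStar]
  | cons c r ih =>
    intro cur
    have hr : '*' ∉ r := fun hm => h (List.mem_cons_of_mem _ hm)
    by_cases hc : c = ','
    · subst hc
      simp [splitC, lastStar, anyStar_splitC, hr]
    · simp only [splitC, if_neg hc]
      exact ih hr _

theorem foldA_spec (l : List Char) : ∀ (ind cont : Int),
    l.foldl centroStep (ind, cont) =
      ((if '*' ∈ l then cont + lastStar (splitC l []) else ind),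
       cont + (l.count ',' : Int)) := by
  induction l with
  | nil => intro ind cont; simp
  | cons c r ih =>
    intro ind cont
    by_cases hc : c = ','
    · subst hc
      rw [List.foldl_cons, show centroStep (ind, cont) ',' = (ind, cont + 1) from by
        simp [centroStep]]
      rw [ih]
      have h2 : lastStar (splitC (',' :: r) []) =
          if (splitC r []).any (fun g => decide ('*' ∈ g)) then 1 + lastStar (splitC r []) else 0 := rfl
      rw [h2, anyStar_splitC]
      by_cases hs : '*' ∈ r
      · simp [hs, List.mem_cons, Prod.ext_iff]
        constructor <;> first | ring | trivial
      · simp [hs, List.mem_cons, Prod.ext_iff]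
        omega
    · by_cases hs : c = '*'
      · subst hs
        rw [List.foldl_cons, show centroStep (ind, cont) '*' = (cont, cont) from by
          simp [centroStep]]
        rw [ih]
        simp only [splitC, if_neg hc, lastStar_splitC_cur]
        by_cases hr : '*' ∈ r
        · simp [hr, List.mem_cons]
        · simp [hr, lastStar_splitC_noStar r hr, List.mem_cons]
      · rw [List.foldl_cons, show centroStep (ind, cont) c = (ind, cont) from by
          simp [centroStep, hc, hs]]
        rw [ih]
        simp only [splitC, if_neg hc, lastStar_splitC_cur]
        have hne : ¬ ('*' = c) := fun h => hs h.symm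
        simp [hc, List.mem_cons, hne]

theorem foldE_spec (gs : List (List Char)) : ∀ (s r : Int),
    (PySem.List.enumerate gs s).foldl
      (fun res p => if PySem.Chars.isIn ['*'] p.2 then p.1 else res) r
    = if gs.any (fun g => decide ('*' ∈ g)) then s + lastStar gs else r := by
  induction gs with
  | nil => intro s r; simp [PySem.List.enumerate_nil]
  | cons g gs ih =>
    intro s r
    rw [PySem.List.enumerate_cons, List.foldl_cons, ih]
    simp only [isIn_star_singleton, lastStar]
    by_cases hgs : gs.any (fun g => decide ('*' ∈ g)) = true
    · simp [hgs]; ring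
    · by_cases hg : '*' ∈ g
      · simp [hg, hgs, List.any_cons]
      · simp [hg, hgs, List.any_cons]

-- ===== VERDICT (by name: the statement is the Claim_ definition above) =====
theorem centro_spec : Claim_equal_centro := by
  intro strg _
  unfold Spec_centro centro centro_alt
  rw [splitOn_eq_splitC, foldE_spec, foldA_spec, anyStar_splitC]
  simp
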